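-- pv_equiv track=rewrite | github.com/Lormenyo/daily-Dose-of-Code | other/possibleAnswer.py | find
-- ===== SOURCE A (Python) =====
-- def find(words, string):
--
--     stringMap = {}
--     for character in string:
--         stringMap[character] = stringMap.get(character, 0) + 1
--
--     for word in words:
--         wordMap = {}
--         isMatch = True
--         for character in word:
--             wordMap[character] = wordMap.get(character, 0) + 1
--
--         for c in wordMap:
--             if c not in stringMap or stringMap[c] < wordMap[c]:
--                 isMatch = False
--
--         if isMatch:
--             return word
--
--     return '-'
-- ===== SOURCE B (Python) =====
-- def find(words, string):
--     pool = sorted(string)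
--     for word in words:
--         i = 0
--         ok = True
--         for ch in sorted(word):
--             while i < len(pool) and pool[i] < ch:
--                 i += 1
--             if i == len(pool) or pool[i] != ch:
--                 ok = False
--                 break
--             i += 1
--         if ok:
--             return word
--     return '-'
-- ===== Notes on version B (the rewrite author's own statement) =====
-- stated objective: alternative
-- what changed: B sorts the string once and sorts each word, then checks containment by a two-pointer merge scan (sorted word must be a subsequence of the sorted string), instead of A's character-count dictionaries and key-comparison pass.
import Mathlib
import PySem

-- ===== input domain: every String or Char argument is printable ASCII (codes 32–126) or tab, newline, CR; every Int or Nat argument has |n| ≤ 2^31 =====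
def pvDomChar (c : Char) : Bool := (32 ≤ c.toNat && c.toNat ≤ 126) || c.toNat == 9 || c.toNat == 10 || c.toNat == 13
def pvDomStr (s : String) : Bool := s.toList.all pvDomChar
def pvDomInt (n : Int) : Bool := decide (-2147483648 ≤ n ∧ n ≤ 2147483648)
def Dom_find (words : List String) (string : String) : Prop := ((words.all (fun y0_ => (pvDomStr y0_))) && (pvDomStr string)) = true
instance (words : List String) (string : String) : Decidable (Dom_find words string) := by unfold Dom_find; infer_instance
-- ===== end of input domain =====

-- B replaces A's character-count dictionaries by sorting the string once and each word,
-- then checking containment with a two-pointer merge scan (objective: alternative algorithm).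

-- ===== PORT A =====
-- 'for c in wordMap: if c not in stringMap or stringMap[c] < wordMap[c]: isMatch = False'
-- (stringMap[c] is only read when 'c in stringMap' already holds, so getD c 0 is exact here)
def findCheck (stringMap wordMap : PySem.Dict Char Int) (c : Char) (isMatch : Bool) : Bool :=
  if ¬ (stringMap.contains c) ∨ stringMap.getD c 0 < wordMap.getD c 0 then false else isMatch

-- 'wordMap = {}; for character in word: wordMap[character] = wordMap.get(character, 0) + 1'
def wordMapOf (w : List Char) : PySem.Dict Char Int :=
  w.foldl (fun d ch => d.insert ch (d.getD ch 0 + 1)) PySem.Dict.empty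

-- 'isMatch = True; for c in wordMap: …'
def isMatchOf (stringMap : PySem.Dict Char Int) (w : List Char) : Bool :=
  (PySem.Dict.keys (wordMapOf w)).foldl (fun b c => findCheck stringMap (wordMapOf w) c b) true

-- 'for word in words: … if isMatch: return word' ; 'return "-"'
def findLoopA (stringMap : PySem.Dict Char Int) : List String → String
  | [] => "-"
  | word :: rest =>
      if isMatchOf stringMap word.toList then word else findLoopA stringMap rest

def find (words : List String) (string : String) : String :=
  let stringMap := string.toList.foldl (fun d ch => d.insert ch (d.getD ch 0 + 1)) PySem.Dict.empty
  findLoopA stringMap words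

-- ===== PORT B =====
-- the inner two-pointer scan: 'for ch in sorted(word): while i < len(pool) and pool[i] < ch: i += 1;
--   if i == len(pool) or pool[i] != ch: ok = False; break ; i += 1' — the index i into pool is
-- rendered structurally as recursion on the suffix pool[i:].
def covered : List Char → List Char → Bool
  | [], _ => true
  | _ :: _, [] => false
  | c :: w, p :: ps =>
      if p < c then covered (c :: w) ps
      else if p = c then covered w ps
      else false
  termination_by w p => w.length + p.length

-- 'for word in words: … if ok: return word' ; 'return "-"'
def findLoopB (pool : List Char) : List String → String
  | [] => "-"
  | word :: rest =>
      if covered (PySem.List.sorted word.toList (fun c => c) false) pool then word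
      else findLoopB pool rest

def find_alt (words : List String) (string : String) : String :=
  let pool := PySem.List.sorted string.toList (fun c => c) false
  findLoopB pool words

-- ===== PRECONDITION & SPEC =====
def Spec_find (words : List String) (string : String) (out : String) : Prop := out = find_alt words string
instance (words : List String) (string : String) (out : String) : Decidable (Spec_find words string out) := by unfold Spec_find; infer_instance

-- ===== CLAIM (what is proved, stated in full; the proofs are below) =====
def Claim_equal_find : Prop := ∀ (words : List String) (string : String), Dom_find words string → Spec_find words string (find words string)

-- ===== LEMMAS AND PROOFS =====

-- A's key loop: result is true iff no key fails the check.
theorem foldl_check (p : Char → Prop) [DecidablePred p] (l : List Char) (b : Bool) :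
    l.foldl (fun b c => if p c then false else b) b = (b && l.all (fun c => !(decide (p c)))) := by
  induction l generalizing b with
  | nil => simp
  | cons c t ih =>
      simp only [List.foldl_cons, List.all_cons, ih]
      by_cases h : p c <;> simp [h]

-- A's per-word verdict: the key-comparison loop succeeds iff the string's counts cover the word's.
theorem matchA_iff (s w : List Char) :
    ((PySem.Dict.keys (w.foldl (fun d ch => d.insert ch (d.getD ch 0 + 1)) (PySem.Dict.empty : PySem.Dict Char Int))).foldl
      (fun b c => findCheck (s.foldl (fun d ch => d.insert ch (d.getD ch 0 + 1)) PySem.Dict.empty)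
        (w.foldl (fun d ch => d.insert ch (d.getD ch 0 + 1)) PySem.Dict.empty) c b) true) = true
    ↔ ∀ c : Char, w.count c ≤ s.count c := by
  rw [PySem.Dict.foldl_insert_getD_add_one_eq_counter s,
      PySem.Dict.foldl_insert_getD_add_one_eq_counter w]
  unfold findCheck
  rw [foldl_check (fun c => ¬ ((PySem.Dict.counter s).contains c = true) ∨
        (PySem.Dict.counter s).getD c 0 < (PySem.Dict.counter w).getD c 0)]
  simp only [Bool.true_and, List.all_eq_true, Bool.not_eq_eq_eq_not, Bool.not_true,
    decide_eq_false_iff_not, not_or, not_lt, not_not, PySem.Dict.getD_counter,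
    PySem.Dict.contains_counter]
  simp only [PySem.Dict.keys_counter, PySem.Set.mem_ofList]
  constructor
  · intro h c
    by_cases hc : c ∈ w
    · exact_mod_cast (h c hc).2
    · rw [List.count_eq_zero.mpr hc]; positivity
  · intro h x hxw
    refine ⟨?_, by exact_mod_cast h x⟩
    have h1 : 0 < w.count x := List.count_pos_iff.mpr hxw
    have h2 := h x
    have : 0 < s.count x := by omega
    simpa [List.contains_iff_mem] using List.count_pos_iff.mp this

-- B's scan only succeeds on subsequences.
theorem covered_sublist (w p : List Char) (h : covered w p = true) : List.Sublist w p := by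
  induction p generalizing w with
  | nil =>
      cases w with
      | nil => exact List.Sublist.refl _
      | cons c w' => simp [covered] at h
  | cons q ps ih =>
      cases w with
      | nil => exact List.nil_sublist _
      | cons c w' =>
          rw [covered] at h
          split_ifs at h with h1 h2
          · exact (ih _ h).cons q
          · subst h2; exact (ih _ h).cons₂ q

-- and succeeds on every subsequence of a sorted pool.
theorem sublist_covered (w p : List Char) (hp : p.Pairwise (· ≤ ·)) (h : List.Sublist w p) :
    covered w p = true := by
  induction p generalizing w with
  | nil =>
      cases w with
      | nil => simp [covered]
      | cons c w' => simp at h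
  | cons q ps ih =>
      cases w with
      | nil => simp [covered]
      | cons c w' =>
          rw [covered]
          rcases List.pairwise_cons.mp hp with ⟨hq, hps⟩
          split_ifs with h1 h2
          · -- q < c: the sublist cannot use the head q, so c::w' <+ ps
            cases h with
            | cons _ htail => exact ih _ hps htail
            | cons₂ _ htail => exact absurd h1 (lt_irrefl _)
          · subst h2; exact ih _ hps (List.cons_sublist_cons.mp h)
          · -- c < q (since ¬ q < c and q ≠ c): but c ∈ q :: ps and q is minimal
            exfalso
            have hc : c ∈ q :: ps := h.subset List.mem_cons_self
            rcases List.mem_cons.mp hc with hc | hc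
            · exact h2 hc.symm
            · have hcq : c < q := lt_of_le_of_ne (not_lt.mp h1) (fun e => h2 e.symm)
              exact absurd (hq c hc) (not_le.mpr hcq)

-- B's per-word verdict: the merge scan over the sorted lists succeeds iff the counts cover.
theorem matchB_iff (s w : List Char) :
    covered (PySem.List.sorted w (fun c => c) false) (PySem.List.sorted s (fun c => c) false) = true
    ↔ ∀ c : Char, w.count c ≤ s.count c := by
  have pw : (PySem.List.sorted w (fun c => c) false).Perm w := PySem.List.sorted_perm w _ _
  have ps : (PySem.List.sorted s (fun c => c) false).Perm s := PySem.List.sorted_perm s _ _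
  have hcnt : ∀ c : Char, (PySem.List.sorted w (fun c => c) false).count c = w.count c :=
    fun c => pw.count_eq c
  have hcnt' : ∀ c : Char, (PySem.List.sorted s (fun c => c) false).count c = s.count c :=
    fun c => ps.count_eq c
  constructor
  · intro h c
    have hsp := (covered_sublist _ _ h).subperm
    have hle := List.subperm_ext_iff.mp hsp c
    by_cases hc : c ∈ PySem.List.sorted w (fun c => c) false
    · rw [hcnt, hcnt'] at hle; exact hle hc
    · rw [← hcnt c, List.count_eq_zero.mpr hc]; exact Nat.zero_le _
  · intro h
    apply sublist_covered _ _
      (by simpa using PySem.List.sorted_pairwise s (fun c => c))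
    apply List.sublist_of_subperm_of_pairwise _
      (by simpa using PySem.List.sorted_pairwise w (fun c => c))
      (by simpa using PySem.List.sorted_pairwise s (fun c => c))
    exact List.subperm_ext_iff.mpr (fun c _ => by rw [hcnt, hcnt']; exact h c)

theorem loops_eq (s : List Char) (words : List String) :
    findLoopA (s.foldl (fun d ch => d.insert ch (d.getD ch 0 + 1)) PySem.Dict.empty) words
    = findLoopB (PySem.List.sorted s (fun c => c) false) words := by
  induction words with
  | nil => rfl
  | cons w rest ih =>
      unfold findLoopA findLoopB isMatchOf wordMapOf
      by_cases h : ∀ c : Char, w.toList.count c ≤ s.count c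
      · rw [if_pos ((matchA_iff s w.toList).mpr h), if_pos ((matchB_iff s w.toList).mpr h)]
      · rw [if_neg (by simpa using fun hm => h ((matchA_iff s w.toList).mp hm)),
            if_neg (by simpa using fun hm => h ((matchB_iff s w.toList).mp hm))]
        exact ih

-- ===== VERDICT (by name: the statement is the Claim_ definition above) =====
theorem find_spec : Claim_equal_find := by
  intro words string _
  unfold Spec_find find find_alt
  exact loops_eq string.toList words
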